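-- pv_equiv track=rewrite | github.com/ESunilkumar/MTICA | day13_program_07.py | countreds
-- ===== SOURCE A (Python) =====
-- def countreds(alist):
--     count=0
--     for color, number in alist:
--         if color=='black':
--             yield count
--             count=0
--         else:
--             count += 1
--     yield count
-- ===== SOURCE B (Python) =====
-- def countreds(alist):
--     # Build the grouping structure first, then yield lengths.
--     groups = [[]]
--     for item in alist:
--         if item[0] == 'black':
--             groups.append([])
--         else:
--             groups[-1].append(item)
--     for g in groups:
--         yield len(g)
-- ===== Notes on version B (the rewrite author's own statement) =====
-- stated objective: alternative
-- what changed: Replaces the running counter that yields on each 'black' with a two-pass decomposition: first build the list of non-black groups delimited by 'black' entries, then yield each group's length.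
import Mathlib
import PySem

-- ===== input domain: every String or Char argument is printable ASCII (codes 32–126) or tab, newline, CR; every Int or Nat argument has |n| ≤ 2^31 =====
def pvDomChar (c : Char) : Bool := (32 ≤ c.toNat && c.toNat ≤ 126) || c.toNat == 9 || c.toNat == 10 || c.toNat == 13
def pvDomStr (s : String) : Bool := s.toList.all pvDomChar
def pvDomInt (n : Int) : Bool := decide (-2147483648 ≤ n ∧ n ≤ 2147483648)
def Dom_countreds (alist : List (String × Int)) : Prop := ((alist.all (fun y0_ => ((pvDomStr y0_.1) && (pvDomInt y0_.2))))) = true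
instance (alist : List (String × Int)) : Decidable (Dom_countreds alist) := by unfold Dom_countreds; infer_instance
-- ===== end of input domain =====

-- B builds the list of groups between 'black' entries first, then maps to lengths (alternative decomposition); A keeps a running counter.
-- A is a generator; under the convention both are the List Int of yielded values.
-- ===== PORT A =====
def countreds (alist : List (String × Int)) : List Int :=
  let p := alist.foldl (fun (st : List Int × Int) cn =>
    if cn.1 = "black" then (st.1 ++ [st.2], (0 : Int)) else (st.1, st.2 + 1)) ([], 0)
  p.1 ++ [p.2]

-- ===== PORT B =====
-- groups[-1].append(item): append x to the last group
def pvPushLast (groups : List (List (String × Int))) (x : String × Int) : List (List (String × Int)) :=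
  match groups with
  | [] => [[x]]
  | [g] => [g ++ [x]]
  | g :: rest => g :: pvPushLast rest x

def countreds_alt (alist : List (String × Int)) : List Int :=
  let groups := alist.foldl (fun gs it =>
    if it.1 = "black" then gs ++ [[]] else pvPushLast gs it) [[]]
  groups.map (fun g => (g.length : Int))

-- ===== PRECONDITION & SPEC =====
def Spec_countreds (alist : List (String × Int)) (out : List Int) : Prop := out = countreds_alt alist
instance (alist : List (String × Int)) (out : List Int) : Decidable (Spec_countreds alist out) := by unfold Spec_countreds; infer_instance

-- ===== CLAIM (what is proved, stated in full; the proofs are below) =====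
def Claim_equal_countreds : Prop := ∀ (alist : List (String × Int)), Dom_countreds alist → Spec_countreds alist (countreds alist)

-- ===== LEMMAS AND PROOFS =====

lemma pvPushLast_map_length (gs : List (List (String × Int))) (x : String × Int)
    (acc : List Int) (count : Int)
    (h : gs.map (fun g => (g.length : Int)) = acc ++ [count]) :
    (pvPushLast gs x).map (fun g => (g.length : Int)) = acc ++ [count + 1] := by
  induction gs generalizing acc with
  | nil => simp at h
  | cons g rest ih =>
    cases rest with
    | nil =>
      cases acc with
      | nil =>
        simp [pvPushLast] at h ⊢
        omega
      | cons a acc' =>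
        exfalso
        have := congrArg List.length h
        simp at this
    | cons g' rest' =>
      cases acc with
      | nil =>
        exfalso
        have := congrArg List.length h
        simp at this
      | cons a acc' =>
        simp [pvPushLast] at h ⊢
        exact ⟨h.1, ih _ h.2⟩

lemma pv_loop (l : List (String × Int)) (acc : List Int) (count : Int)
    (gs : List (List (String × Int)))
    (h : gs.map (fun g => (g.length : Int)) = acc ++ [count]) :
    (let p := l.foldl (fun (st : List Int × Int) cn =>
        if cn.1 = "black" then (st.1 ++ [st.2], (0 : Int)) else (st.1, st.2 + 1)) (acc, count)
     p.1 ++ [p.2]) =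
    (l.foldl (fun gs it => if it.1 = "black" then gs ++ [[]] else pvPushLast gs it) gs).map
      (fun g => (g.length : Int)) := by
  induction l generalizing acc count gs with
  | nil => simpa using h.symm
  | cons cn rest ih =>
    by_cases hb : cn.1 = "black"
    · simp [List.foldl_cons, hb]
      exact ih (acc ++ [count]) 0 (gs ++ [[]]) (by simp [h])
    · simp [List.foldl_cons, hb]
      exact ih acc (count + 1) (pvPushLast gs cn) (pvPushLast_map_length gs cn acc count h)

-- ===== VERDICT (by name: the statement is the Claim_ definition above) =====
theorem countreds_spec : Claim_equal_countreds := by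
  intro alist _
  unfold Spec_countreds countreds countreds_alt
  exact pv_loop alist [] 0 [[]] (by simp)
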